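-- pv_equiv track=rewrite | github.com/lcalmvr/sub_assistant | ai/document_extractor.py | extract_coverage_sections
-- ===== SOURCE A (Python) =====
-- def extract_coverage_sections(text: str, max_length: int = 15000) -> str:
--     """
--     Pre-process text to focus on coverage-relevant sections.
--     Useful for large documents to reduce token usage.
--
--     Args:
--         text: Full document text
--         max_length: Maximum output length
--
--     Returns:
--         Filtered text focusing on coverage information
--     """
--     # Keywords that indicate coverage-relevant sections
--     coverage_keywords = [
--         "coverage", "sublimit", "limit", "deductible", "retention",
--         "insuring agreement", "schedule", "endorsement",
--         "aggregate", "occurrence", "waiting period",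
--         "ransomware", "extortion", "business interruption",
--         "network security", "privacy", "regulatory",
--         "social engineering", "fraud", "breach response",
--         "media liability", "cyber", "technology"
--     ]
--
--     lines = text.split('\n')
--     relevant_lines = []
--     include_next = 0  # Include N lines after a keyword match
--
--     for line in lines:
--         line_lower = line.lower()
--
--         # Check if line contains any coverage keywords
--         has_keyword = any(kw in line_lower for kw in coverage_keywords)
--
--         # Check if line contains dollar amounts (likely limit info)
--         has_amount = any(c in line for c in ['$', 'USD']) or \
--                      any(suffix in line.upper() for suffix in ['K', 'M', '000'])
--
--         if has_keyword or has_amount or include_next > 0: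
--             relevant_lines.append(line)
--             if has_keyword:
--                 include_next = 3  # Include next 3 lines for context
--             else:
--                 include_next = max(0, include_next - 1)
--
--     filtered_text = '\n'.join(relevant_lines)
--
--     # If we filtered too aggressively, return original (truncated)
--     if len(filtered_text) < 500:
--         return text[:max_length]
--
--     # Truncate if still too long
--     if len(filtered_text) > max_length:
--         return filtered_text[:max_length] + "\n\n[... truncated ...]"
--
--     return filtered_text
-- ===== SOURCE B (Python) =====
-- COVERAGE_KEYWORDS = [
--     "coverage", "sublimit", "limit", "deductible", "retention",
--     "insuring agreement", "schedule", "endorsement",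
--     "aggregate", "occurrence", "waiting period",
--     "ransomware", "extortion", "business interruption",
--     "network security", "privacy", "regulatory",
--     "social engineering", "fraud", "breach response",
--     "media liability", "cyber", "technology"
-- ]
--
--
-- def _has_keyword(line):
--     low = line.lower()
--     return any(kw in low for kw in COVERAGE_KEYWORDS)
--
--
-- def _has_amount(line):
--     return any(c in line for c in ['$', 'USD']) or \
--         any(sfx in line.upper() for sfx in ['K', 'M', '000'])
--
--
-- def extract_coverage_sections(text: str, max_length: int = 15000) -> str:
--     # Pass 1: per-line keyword flags.  Pass 2: stateless mask — keep a line if it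
--     # matches a keyword, looks like an amount, or sits within the 3-line window
--     # after a keyword line (dilation of the keyword mask).
--     lines = text.split('\n')
--     kw_flags = [_has_keyword(line) for line in lines]
--     filtered = '\n'.join(
--         line for i, line in enumerate(lines)
--         if kw_flags[i] or _has_amount(line) or any(kw_flags[max(0, i - 3):i])
--     )
--     if len(filtered) < 500:
--         return text[:max_length]
--     if len(filtered) > max_length:
--         return filtered[:max_length] + "\n\n[... truncated ...]"
--     return filtered
-- ===== Notes on version B (the rewrite author's own statement) =====
-- stated objective: alternative
-- what changed: Replaces A's single stateful loop with an include_next countdown by two passes: precompute per-line keyword flags, then keep each line by a stateless test (keyword flag, amount test, or any keyword flag in the 3-line window before it).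
import Mathlib
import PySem

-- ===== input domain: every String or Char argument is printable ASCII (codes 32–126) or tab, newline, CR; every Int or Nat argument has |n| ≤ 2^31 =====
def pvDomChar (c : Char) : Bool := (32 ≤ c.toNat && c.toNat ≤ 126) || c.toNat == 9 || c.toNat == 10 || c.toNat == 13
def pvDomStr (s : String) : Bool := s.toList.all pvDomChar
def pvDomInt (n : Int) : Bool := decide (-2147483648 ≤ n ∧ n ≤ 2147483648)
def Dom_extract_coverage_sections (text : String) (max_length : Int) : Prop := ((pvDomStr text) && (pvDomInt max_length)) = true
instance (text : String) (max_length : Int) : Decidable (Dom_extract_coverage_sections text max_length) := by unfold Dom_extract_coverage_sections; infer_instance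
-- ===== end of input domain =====

-- B replaces A's stateful countdown loop with a precomputed keyword-flag list and a
-- stateless per-line window test (same cost; a clearer mask/dilation decomposition).

-- ===== PORT A =====
def pvKeywords : List String := [
  "coverage", "sublimit", "limit", "deductible", "retention",
  "insuring agreement", "schedule", "endorsement",
  "aggregate", "occurrence", "waiting period",
  "ransomware", "extortion", "business interruption",
  "network security", "privacy", "regulatory",
  "social engineering", "fraud", "breach response",
  "media liability", "cyber", "technology"]

-- any(kw in line.lower() for kw in coverage_keywords)
def pvHasKw (line : String) : Bool :=
  pvKeywords.any (fun kw => PySem.Str.isIn kw (PySem.Str.lower line))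

-- any(c in line for c in ['$','USD']) or any(sfx in line.upper() for sfx in ['K','M','000'])
def pvHasAmt (line : String) : Bool :=
  (["$", "USD"].any (fun c => PySem.Str.isIn c line)) ||
  (["K", "M", "000"].any (fun sfx => PySem.Str.isIn sfx (PySem.Str.upper line)))

-- A's for-loop: accumulator of kept lines + the include_next countdown state.
def pvLoopA : List String → List String → Int → List String
  | [], acc, _ => acc
  | line :: rest, acc, inc =>
    let hk := pvHasKw line
    let ha := pvHasAmt line
    if hk || ha || inc > 0 then
      pvLoopA rest (acc ++ [line]) (if hk then 3 else max 0 (inc - 1))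
    else
      pvLoopA rest acc inc

def extract_coverage_sections (text : String) (max_length : Int) : String :=
  let lines := (PySem.Str.split? text "\n").getD []
  let filtered := PySem.Str.join "\n" (pvLoopA lines [] 0)
  if PySem.Str.len filtered < 500 then
    PySem.Str.slice text none (some max_length)
  else if PySem.Str.len filtered > max_length then
    PySem.Str.slice filtered none (some max_length) ++ "\n\n[... truncated ...]"
  else
    filtered

-- ===== PORT B =====
def hasKeywordB (line : String) : Bool :=
  pvKeywords.any (fun kw => PySem.Str.isIn kw (PySem.Str.lower line))

def hasAmountB (line : String) : Bool :=
  (["$", "USD"].any (fun c => PySem.Str.isIn c line)) ||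
  (["K", "M", "000"].any (fun sfx => PySem.Str.isIn sfx (PySem.Str.upper line)))

-- kw_flags[i] has 0 ≤ i < len(kw_flags), so Python's kw_flags[i] is the plain lookup pyGetD.
def extract_coverage_sections_alt (text : String) (max_length : Int) : String :=
  let lines := (PySem.Str.split? text "\n").getD []
  let kwFlags := lines.map hasKeywordB
  let kept := ((PySem.List.enumerate lines 0).filter (fun p =>
      PySem.List.pyGetD kwFlags p.1 false || hasAmountB p.2 ||
      (PySem.List.slice kwFlags (some (max 0 (p.1 - 3))) (some p.1)).any id)).map (·.2)
  let filtered := PySem.Str.join "\n" kept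
  if PySem.Str.len filtered < 500 then
    PySem.Str.slice text none (some max_length)
  else if PySem.Str.len filtered > max_length then
    PySem.Str.slice filtered none (some max_length) ++ "\n\n[... truncated ...]"
  else
    filtered

-- ===== PRECONDITION & SPEC =====
def Spec_extract_coverage_sections (text : String) (max_length : Int) (out : String) : Prop := out = extract_coverage_sections_alt text max_length
instance (text : String) (max_length : Int) (out : String) : Decidable (Spec_extract_coverage_sections text max_length out) := by unfold Spec_extract_coverage_sections; infer_instance

-- ===== CLAIM (what is proved, stated in full; the proofs are below) =====
def Claim_equal_extract_coverage_sections : Prop := ∀ (text : String) (max_length : Int), Dom_extract_coverage_sections text max_length → Spec_extract_coverage_sections text max_length (extract_coverage_sections text max_length)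

-- ===== LEMMAS AND PROOFS =====

lemma hasKeywordB_eq : hasKeywordB = pvHasKw := rfl
lemma hasAmountB_eq : hasAmountB = pvHasAmt := rfl

-- proof-side: A's countdown as a function of the (reversed) keyword-flag history
def pvIncOf : List Bool → Int
  | [] => 0
  | k :: h => if k then 3 else max 0 (pvIncOf h - 1)

-- proof-side: window-filter with the reversed keyword-flag history of earlier lines
def pvWin (h : List Bool) : List String → List String
  | [] => []
  | l :: ls =>
    (if pvHasKw l || pvHasAmt l || (h.take 3).any id then [l] else []) ++ pvWin (pvHasKw l :: h) ls

lemma pvIncOf_eq (h : List Bool) :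
    pvIncOf h = (if h.getD 0 false then 3 else if h.getD 1 false then 2
                 else if h.getD 2 false then 1 else 0) := by
  induction h with
  | nil => simp [pvIncOf]
  | cons k t ih =>
    simp only [pvIncOf, ih, List.getD_cons_succ, List.getD_cons_zero]
    cases k <;> cases t.getD 0 false <;> cases t.getD 1 false <;> cases t.getD 2 false <;>
      simp

lemma pvIncOf_pos_iff (h : List Bool) :
    (0 < pvIncOf h) ↔ ((h.take 3).any id = true) := by
  have htake : (h.take 3).any id = (h.getD 0 false || (h.getD 1 false || h.getD 2 false)) := by
    match h with
    | [] => simp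
    | [a] => simp
    | [a, b] => simp
    | a :: b :: c :: t => simp
  rw [pvIncOf_eq, htake]
  cases h.getD 0 false <;> cases h.getD 1 false <;> cases h.getD 2 false <;> simp

lemma pvLoopA_eq_pvWin (suf : List String) (h : List Bool) (acc : List String) :
    pvLoopA suf acc (pvIncOf h) = acc ++ pvWin h suf := by
  induction suf generalizing h acc with
  | nil => simp [pvLoopA, pvWin]
  | cons l ls ih =>
    have hnn : 0 ≤ pvIncOf h := by rw [pvIncOf_eq]; split_ifs <;> omega
    have hdec : decide (pvIncOf h > 0) = (h.take 3).any id := by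
      cases hb : (h.take 3).any id
      · simp only [decide_eq_false_iff_not]
        intro hpos
        exact absurd ((pvIncOf_pos_iff h).1 hpos) (by simp [hb])
      · simp only [decide_eq_true_eq]
        exact (pvIncOf_pos_iff h).2 hb
    simp only [pvLoopA, pvWin, hdec]
    by_cases hc : (pvHasKw l || pvHasAmt l || (h.take 3).any id) = true
    · rw [if_pos hc, if_pos hc]
      have : (if pvHasKw l = true then 3 else max 0 (pvIncOf h - 1)) = pvIncOf (pvHasKw l :: h) := by
        simp [pvIncOf]
      rw [this, ih]
      simp
    · rw [if_neg hc, if_neg hc]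
      have hk : pvHasKw l = false := by
        cases hkk : pvHasKw l <;> simp [hkk] at hc ⊢
      have hz : pvIncOf h = 0 := by
        have : ¬ (0 < pvIncOf h) := fun hp => hc (by simp [(pvIncOf_pos_iff h).1 hp])
        omega
      have : pvIncOf h = pvIncOf (pvHasKw l :: h) := by simp [pvIncOf, hk, hz]
      rw [this, ih]
      simp

lemma pvAlt_kept_eq_pvWin (pre suf : List String) :
    (((PySem.List.enumerate suf (pre.length : Int)).filter (fun p =>
        PySem.List.pyGetD ((pre ++ suf).map hasKeywordB) p.1 false || hasAmountB p.2 ||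
        (PySem.List.slice ((pre ++ suf).map hasKeywordB) (some (max 0 (p.1 - 3))) (some p.1)).any id)).map (·.2))
    = pvWin ((pre.map hasKeywordB).reverse) suf := by
  induction suf generalizing pre with
  | nil => simp [pvWin, PySem.List.enumerate_nil]
  | cons l ls ih =>
    have hflags : (pre ++ l :: ls).map hasKeywordB
        = pre.map hasKeywordB ++ hasKeywordB l :: ls.map hasKeywordB := by simp
    have hget : PySem.List.pyGetD ((pre ++ l :: ls).map hasKeywordB) ((pre.length : Int)) false
        = hasKeywordB l := by
      rw [PySem.List.pyGetD_natCast, hflags]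
      have h1 : pre.length = (pre.map hasKeywordB).length := by simp
      rw [h1]
      simp [List.getD_eq_getElem?_getD]
    have hcast : ((pre.length - 3 : Nat) : Int) = max 0 ((pre.length : Int) - 3) := by omega
    have hslice : PySem.List.slice ((pre ++ l :: ls).map hasKeywordB)
          (some (max 0 ((pre.length : Int) - 3))) (some (pre.length : Int))
        = (pre.map hasKeywordB).drop (pre.length - 3) := by
      rw [← hcast, PySem.List.slice_natCast, hflags,
        List.drop_append_of_le_length (by simp only [List.length_map]; omega),
        List.take_append_of_le_length (by simp only [List.length_drop, List.length_map]; omega)]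
      have h2 : pre.length - (pre.length - 3)
          = ((pre.map hasKeywordB).drop (pre.length - 3)).length := by
        simp only [List.length_drop, List.length_map]
      rw [h2, List.take_length]
    have hany : ((pre.map hasKeywordB).drop (pre.length - 3)).any id
        = (((pre.map hasKeywordB).reverse).take 3).any id := by
      rw [List.take_reverse, List.any_reverse]
      congr 2
      simp
    have hrec := ih (pre ++ [l])
    rw [List.append_assoc, List.singleton_append] at hrec
    have hlen : (((pre ++ [l]).length : Nat) : Int) = (pre.length : Int) + 1 := by
      simp
    have hhist : ((pre ++ [l]).map hasKeywordB).reverse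
        = hasKeywordB l :: (pre.map hasKeywordB).reverse := by simp
    rw [hlen, hhist] at hrec
    rw [PySem.List.enumerate_cons, List.filter_cons]
    simp only [hget, hslice, hany]
    by_cases hc : (hasKeywordB l || hasAmountB l
        || (((pre.map hasKeywordB).reverse).take 3).any id) = true
    · rw [if_pos (by simpa using hc)]
      simp only [List.map_cons]
      rw [hrec]
      simp only [pvWin]
      rw [if_pos (by simpa [hasKeywordB_eq, hasAmountB_eq] using hc)]
      simp [hasKeywordB_eq]
    · rw [if_neg (by simpa using hc)]
      rw [hrec]
      simp only [pvWin]
      rw [if_neg (by simpa [hasKeywordB_eq, hasAmountB_eq] using hc)]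
      simp [hasKeywordB_eq]

-- ===== VERDICT (by name: the statement is the Claim_ definition above) =====
theorem extract_coverage_sections_spec : Claim_equal_extract_coverage_sections := by
  intro text max_length _
  unfold Spec_extract_coverage_sections extract_coverage_sections extract_coverage_sections_alt
  have hlines : pvLoopA ((PySem.Str.split? text "\n").getD []) [] 0
      = (((PySem.List.enumerate ((PySem.Str.split? text "\n").getD []) 0).filter (fun p =>
          PySem.List.pyGetD (((PySem.Str.split? text "\n").getD []).map hasKeywordB) p.1 false || hasAmountB p.2 ||
          (PySem.List.slice (((PySem.Str.split? text "\n").getD []).map hasKeywordB) (some (max 0 (p.1 - 3))) (some p.1)).any id)).map (·.2)) := by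
    have := pvAlt_kept_eq_pvWin [] ((PySem.Str.split? text "\n").getD [])
    simp at this
    rw [this]
    have h0 := pvLoopA_eq_pvWin ((PySem.Str.split? text "\n").getD []) [] []
    simpa [pvIncOf] using h0
  simp only [hlines]
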